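-- pv_equiv track=rewrite | github.com/MichaelBogdanov/git-practice-1 | 3991/yufrikov/task07/solution.py | counterSymbols
-- ===== SOURCE A (Python) =====
-- def counterSymbols(text, registr=False):
--     if registr:
--         text = text.lower() # проверка на регистр
--     freq = {}
--
--     for i in text:
--         if i != ' ':
--             if i in freq:
--                 freq[i] += 1 # прибавление к сущетсвущему символу
--             else :
--                 freq[i] = 1 # добавлние в словрь
--
--     items = list(freq.items())
--
--     n = len(items)
--     for i in range(n): # сортировка пузырьком
--         for j in range(0, n - i - 1):
--             if items[j][1] < items[j + 1][1]:
--                 items[j], items[j + 1] = items[j + 1], items[j]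
--
--     return dict(items)
-- ===== SOURCE B (Python) =====
-- def counterSymbols(text, registr=False):
--     if registr:
--         text = text.lower()
--     freq = {}
--     for c in text:
--         if c != ' ':
--             freq[c] = freq.get(c, 0) + 1
--     return dict(sorted(freq.items(), key=lambda kv: kv[1], reverse=True))
-- ===== Notes on version B (the rewrite author's own statement) =====
-- stated objective: idiomatic
-- what changed: The hand-written O(k^2) bubble sort over the frequency items is replaced by Python's built-in stable sorted(..., key=count, reverse=True), and the nested membership-branching dict update by a single dict.get default update.
import Mathlib
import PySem

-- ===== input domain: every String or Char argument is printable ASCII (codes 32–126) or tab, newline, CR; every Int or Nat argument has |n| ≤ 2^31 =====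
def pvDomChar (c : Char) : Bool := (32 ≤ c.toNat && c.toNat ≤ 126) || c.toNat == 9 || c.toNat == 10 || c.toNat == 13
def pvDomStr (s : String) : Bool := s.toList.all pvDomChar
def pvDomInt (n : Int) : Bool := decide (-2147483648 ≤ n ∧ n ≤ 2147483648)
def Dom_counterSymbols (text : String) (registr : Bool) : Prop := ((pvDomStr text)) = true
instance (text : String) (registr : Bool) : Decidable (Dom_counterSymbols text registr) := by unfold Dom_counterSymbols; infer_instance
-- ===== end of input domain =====

-- B replaces A's hand-written bubble sort of the frequency items with Python's built-in stable
-- sorted(key=count, reverse=True) (idiomatic); same return value, no side effects.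

-- ===== PORT A =====
-- inner bubble loop of A: exactly k adjacent compare-and-swap steps from the left
-- (Python's `for j in range(0, n - i - 1)` over the list of items, swapping when items[j][1] < items[j+1][1])
def pvBubblePass : Nat → List (Char × Int) → List (Char × Int)
  | k + 1, a :: b :: rest =>
      if a.2 < b.2 then b :: pvBubblePass k (a :: rest) else a :: pvBubblePass k (b :: rest)
  | _, l => l

def counterSymbols (text : String) (registr : Bool) : List (String × Int) :=
  let t := if registr then PySem.Str.lower text else text
  let freq : PySem.Dict Char Int := t.toList.foldl
    (fun d i => if i ≠ ' ' then (if d.contains i then d.modify i 0 (· + 1) else d.insert i 1) else d)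
    PySem.Dict.empty
  let items := freq.items
  let n := items.length
  let sortedItems := (PySem.List.pyRange 0 (n : Int)).foldl
    (fun acc i => pvBubblePass ((n : Int) - i - 1).toNat acc) items
  sortedItems.map (fun p => (String.ofList [p.1], p.2))

-- ===== PORT B =====
def counterSymbols_alt (text : String) (registr : Bool) : List (String × Int) :=
  let t := if registr then PySem.Str.lower text else text
  let freq : PySem.Dict Char Int := t.toList.foldl
    (fun d c => if c ≠ ' ' then d.insert c (d.getD c 0 + 1) else d) PySem.Dict.empty
  (PySem.List.sorted freq.items (fun kv => kv.2) true).map (fun p => (String.ofList [p.1], p.2))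

-- ===== PRECONDITION & SPEC =====
def Spec_counterSymbols (text : String) (registr : Bool) (out : List (String × Int)) : Prop := out = counterSymbols_alt text registr
instance (text : String) (registr : Bool) (out : List (String × Int)) : Decidable (Spec_counterSymbols text registr out) := by unfold Spec_counterSymbols; infer_instance

-- ===== CLAIM (what is proved, stated in full; the proofs are below) =====
def Claim_equal_counterSymbols : Prop := ∀ (text : String) (registr : Bool), Dom_counterSymbols text registr → Spec_counterSymbols text registr (counterSymbols text registr)

-- ===== LEMMAS AND PROOFS =====

-- both programs build the same frequency dict
theorem pvFreq_eq (cs : List Char) :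
    cs.foldl (fun d i => if i ≠ ' ' then (if d.contains i then d.modify i 0 (· + 1) else d.insert i 1) else d)
      (PySem.Dict.empty : PySem.Dict Char Int)
    = cs.foldl (fun d c => if c ≠ ' ' then d.insert c (d.getD c 0 + 1) else d) PySem.Dict.empty := by
  apply PySem.List.foldl_congr_mem
  intro d i _
  by_cases h : i = ' '
  · simp [h]
  · by_cases hc : d.contains i
    · simp [h, hc, PySem.Dict.modify]
    · have hz : d.getD i 0 = 0 := by
        have hc' : d.contains i = false := by simpa using hc
        simp [PySem.Dict.getD, PySem.Dict.get?, PySem.Dict.contains] at hc' ⊢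
        rw [List.find?_eq_none.mpr] ; · rfl
        · intro p hp
          have := hc' p.1 p.2 hp; simp [this]
      simp [h, hc, hz]

-- a pass of length k only touches the first k+1 elements
theorem pvBubblePass_append (k : Nat) (p s : List (Char × Int)) (h : k + 1 ≤ p.length) :
    pvBubblePass k (p ++ s) = pvBubblePass k p ++ s := by
  induction k generalizing p with
  | zero => simp [pvBubblePass]
  | succ k ih =>
    obtain ⟨a, b, rest, rfl⟩ : ∃ a b rest, p = a :: b :: rest := by
      match p with
      | [] => simp at h
      | [a] => simp at h
      | a :: b :: rest => exact ⟨a, b, rest, rfl⟩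
    simp only [List.cons_append, pvBubblePass]
    split
    · rw [show a :: (rest ++ s) = (a :: rest) ++ s from rfl,
        ih (a :: rest) (by simp at h ⊢; omega)]
      rfl
    · rw [show b :: (rest ++ s) = (b :: rest) ++ s from rfl,
        ih (b :: rest) (by simp at h ⊢; omega)]
      rfl

-- a full pass over a nonempty list pushes a minimal element to the end, keeps the length
-- and keeps every count-class subsequence intact
theorem pvPass_spec (l : List (Char × Int)) (a : Char × Int) :
    ∃ q e, pvBubblePass l.length (a :: l) = q ++ [e]
      ∧ (q ++ [e]).length = (a :: l).length
      ∧ (∀ x ∈ a :: l, e.2 ≤ x.2)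
      ∧ (∀ c : Int, (q ++ [e]).filter (fun x => x.2 == c) = (a :: l).filter (fun x => x.2 == c)) := by
  induction l generalizing a with
  | nil => exact ⟨[], a, rfl, rfl, by simp, by simp⟩
  | cons b l ih =>
    simp only [List.length_cons, pvBubblePass]
    split
    · rename_i hab
      obtain ⟨q, e, hq, hlen, hmin, hfil⟩ := ih a
      refine ⟨b :: q, e, by simp [hq], by simpa using hlen, ?_, ?_⟩
      · intro x hx
        simp only [List.mem_cons] at hx
        rcases hx with h1 | h1 | h1
        · rw [h1]; exact hmin a (by simp)
        · rw [h1]; exact le_of_lt (lt_of_le_of_lt (hmin a (by simp)) hab)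
        · exact hmin x (by simp [h1])
      · intro c
        have hne : ¬ (a.2 == c ∧ b.2 == c) := by
          rintro ⟨h1, h2⟩; simp at h1 h2; omega
        by_cases h1 : a.2 == c <;> by_cases h2 : b.2 == c <;>
          simp_all [List.filter_cons, List.filter_append]
    · rename_i hab
      obtain ⟨q, e, hq, hlen, hmin, hfil⟩ := ih b
      refine ⟨a :: q, e, by simp [hq], by simpa using hlen, ?_, ?_⟩
      · intro x hx
        simp only [List.mem_cons] at hx
        rcases hx with h1 | h1 | h1
        · rw [h1]; exact le_trans (hmin b (by simp)) (by omega)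
        · rw [h1]; exact hmin b (by simp)
        · exact hmin x (by simp [h1])
      · intro c
        have := hfil c
        simp only [List.cons_append, List.filter_cons] at *
        split <;> simp_all

-- equal count-class filters give equal membership
theorem pvMem_of_filters {l₁ l₂ : List (Char × Int)}
    (h : ∀ c : Int, l₁.filter (fun x => x.2 == c) = l₂.filter (fun x => x.2 == c)) :
    ∀ x, x ∈ l₁ ↔ x ∈ l₂ := by
  intro x
  constructor <;> intro hx
  · have : x ∈ l₂.filter (fun y => y.2 == x.2) := by rw [← h]; simp [hx]
    exact (List.mem_filter.mp this).1
  · have : x ∈ l₁.filter (fun y => y.2 == x.2) := by rw [h]; simp [hx]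
    exact (List.mem_filter.mp this).1

-- the outer bubble loop sorts descending by count and keeps every count-class subsequence
theorem pvBubble_sorts (items : List (Char × Int)) :
    ((List.range items.length).foldl (fun acc j => pvBubblePass (items.length - j - 1) acc) items).Pairwise (fun a b => b.2 ≤ a.2)
    ∧ ∀ c : Int, ((List.range items.length).foldl (fun acc j => pvBubblePass (items.length - j - 1) acc) items).filter (fun x => x.2 == c)
        = items.filter (fun x => x.2 == c) := by
  have key : ∀ j ≤ items.length, ∃ p s,
      (List.range j).foldl (fun acc j => pvBubblePass (items.length - j - 1) acc) items = p ++ s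
      ∧ p.length = items.length - j
      ∧ s.Pairwise (fun a b => b.2 ≤ a.2)
      ∧ (∀ x ∈ p, ∀ y ∈ s, y.2 ≤ x.2)
      ∧ (∀ c : Int, (p ++ s).filter (fun x => x.2 == c) = items.filter (fun x => x.2 == c)) := by
    intro j
    induction j with
    | zero => exact fun _ => ⟨items, [], by simp, by simp, by simp, by simp, by simp⟩
    | succ j ih =>
      intro hj
      obtain ⟨p, s, hstate, hplen, hs, hps, hfil⟩ := ih (by omega)
      rw [List.range_succ, List.foldl_append, hstate]
      simp only [List.foldl_cons, List.foldl_nil]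
      obtain ⟨a, rest, rfl⟩ : ∃ a rest, p = a :: rest := by
        cases p with
        | nil => exfalso; simp at hplen; omega
        | cons a rest => exact ⟨a, rest, rfl⟩
      have hk : items.length - j - 1 = rest.length := by simp at hplen; omega
      rw [hk, pvBubblePass_append rest.length (a :: rest) s (by simp)]
      obtain ⟨q, e, hq, hlen, hmin, hfq⟩ := pvPass_spec rest a
      have hmem := pvMem_of_filters hfq
      have hein : e ∈ a :: rest := (hmem e).mp (by simp)
      rw [hq]
      refine ⟨q, e :: s, by simp, ?_, ?_, ?_, ?_⟩
      · simp at hlen hplen ⊢; omega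
      · exact List.pairwise_cons.mpr ⟨fun y hy => hps e hein y hy, hs⟩
      · intro x hx y hy
        have hxin : x ∈ a :: rest := (hmem x).mp (by simp [hx])
        rcases hy with _ | hy
        · exact hmin x hxin
        · exact hps x hxin y (by assumption)
      · intro c
        rw [show q ++ e :: s = (q ++ [e]) ++ s by simp]
        rw [List.filter_append, hfq c, ← List.filter_append]
        exact hfil c
  obtain ⟨p, s, hstate, hplen, hs, _, hfil⟩ := key items.length le_rfl
  have hp : p = [] := by
    have h0 : p.length = 0 := by omega
    exact List.length_eq_zero_iff.mp h0
  subst hp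
  simp only [List.nil_append] at hstate hfil
  rw [hstate]
  exact ⟨hs, hfil⟩

-- insertBy for the reversed count key preserves descending order
theorem pvInsertBy_pairwise (x : Char × Int) (acc : List (Char × Int))
    (h : acc.Pairwise (fun a b => b.2 ≤ a.2)) :
    (PySem.List.insertBy (fun a b => decide (b.2 < a.2)) x acc).Pairwise (fun a b => b.2 ≤ a.2) := by
  induction acc with
  | nil => simp [PySem.List.insertBy]
  | cons y ys ih =>
    obtain ⟨hy, hys⟩ := List.pairwise_cons.mp h
    simp only [PySem.List.insertBy]
    split
    · rename_i hxy
      simp only [decide_eq_true_eq] at hxy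
      refine List.pairwise_cons.mpr ⟨?_, List.pairwise_cons.mpr ⟨hy, hys⟩⟩
      intro z hz
      rcases List.mem_cons.mp hz with h1 | h1
      · rw [h1]; omega
      · have := hy z h1; omega
    · rename_i hxy
      simp only [decide_eq_true_eq] at hxy
      refine List.pairwise_cons.mpr ⟨?_, ih hys⟩
      intro z hz
      rcases (PySem.List.mem_insertBy _ _ _ _).mp hz with h1 | h1
      · rw [h1]; omega
      · exact hy z h1

-- insertBy appends x at the end of its count class
theorem pvInsertBy_filter (x : Char × Int) (acc : List (Char × Int))
    (h : acc.Pairwise (fun a b => b.2 ≤ a.2)) (c : Int) :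
    (PySem.List.insertBy (fun a b => decide (b.2 < a.2)) x acc).filter (fun y => y.2 == c)
      = acc.filter (fun y => y.2 == c) ++ (if x.2 == c then [x] else []) := by
  induction acc with
  | nil =>
    simp only [PySem.List.insertBy, List.filter_nil, List.nil_append]
    by_cases hc : x.2 == c <;> simp [hc]
  | cons y ys ih =>
    obtain ⟨hy, hys⟩ := List.pairwise_cons.mp h
    simp only [PySem.List.insertBy]
    split
    · rename_i hxy
      simp only [decide_eq_true_eq] at hxy
      by_cases hc : x.2 == c
      · simp only [beq_iff_eq] at hc
        have hnil : (y :: ys).filter (fun z => z.2 == c) = [] := by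
          rw [List.filter_eq_nil_iff]
          intro z hz
          rcases List.mem_cons.mp hz with h1 | h1
          · rw [h1]; simp; omega
          · have := hy z h1; simp; omega
        simp [hc, hnil]
      · simp [hc]
    · rename_i hxy
      by_cases hyc : y.2 == c <;> simp [hyc, ih hys]

-- Python's sorted(key, reverse=True) is stable: count-class subsequences survive
theorem pvSorted_filter (xs : List (Char × Int)) (c : Int) :
    (PySem.List.sorted xs (fun kv => kv.2) true).filter (fun y => y.2 == c)
      = xs.filter (fun y => y.2 == c) := by
  have aux : ∀ (ws : List (Char × Int)) (acc : List (Char × Int)),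
      acc.Pairwise (fun a b => b.2 ≤ a.2) →
      (ws.foldl (fun acc x => PySem.List.insertBy (fun a b => decide (b.2 < a.2)) x acc) acc).filter (fun y => y.2 == c)
        = acc.filter (fun y => y.2 == c) ++ ws.filter (fun y => y.2 == c) := by
    intro ws
    induction ws with
    | nil => intro acc _; simp
    | cons x ws ih =>
      intro acc h
      simp only [List.foldl_cons]
      rw [ih _ (pvInsertBy_pairwise x acc h), pvInsertBy_filter x acc h c]
      by_cases hc : x.2 == c <;> simp [hc]
  rw [PySem.List.sorted_rev_eq_foldl_insertBy]
  simpa using aux xs [] (by simp)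

-- descending order plus equal count-class filters determine the list
theorem pvStableUnique : ∀ (l₁ l₂ : List (Char × Int)),
    l₁.Pairwise (fun a b => b.2 ≤ a.2) → l₂.Pairwise (fun a b => b.2 ≤ a.2) →
    (∀ c : Int, l₁.filter (fun x => x.2 == c) = l₂.filter (fun x => x.2 == c)) →
    l₁ = l₂ := by
  intro l₁
  induction l₁ with
  | nil =>
    intro l₂ _ _ hf
    cases l₂ with
    | nil => rfl
    | cons b t₂ =>
      exfalso
      have := hf b.2
      simp at this
  | cons a t ih =>
    intro l₂ h1 h2 hf
    cases l₂ with
    | nil =>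
      exfalso
      have := hf a.2
      simp at this
    | cons b t₂ =>
      obtain ⟨ha, h1'⟩ := List.pairwise_cons.mp h1
      obtain ⟨hb, h2'⟩ := List.pairwise_cons.mp h2
      have hab : a.2 = b.2 := by
        have m1 : a ∈ b :: t₂ := by
          have : a ∈ (b :: t₂).filter (fun x => x.2 == a.2) := by rw [← hf]; simp
          exact (List.mem_filter.mp this).1
        have m2 : b ∈ a :: t := by
          have : b ∈ (a :: t).filter (fun x => x.2 == b.2) := by rw [hf]; simp
          exact (List.mem_filter.mp this).1
        rcases List.mem_cons.mp m1 with h | h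
        · rw [h]
        · have hA : a.2 ≤ b.2 := hb a h
          rcases List.mem_cons.mp m2 with h' | h'
          · rw [h']
          · have hB : b.2 ≤ a.2 := ha b h'
            omega
      have hfa := hf a.2
      simp [hab] at hfa
      obtain ⟨hab', htl⟩ := hfa
      have hrest : ∀ c : Int, t.filter (fun x => x.2 == c) = t₂.filter (fun x => x.2 == c) := by
        intro c
        by_cases hc : c = b.2
        · rw [hc]; exact htl
        · have hfc := hf c
          have e1 : (a.2 == c) = false := by simp; omega
          have e2 : (b.2 == c) = false := by simp; omega
          simpa [List.filter_cons, e1, e2] using hfc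
      rw [hab', ih t₂ h1' h2' hrest]

-- the bubble loop of A computes exactly Python's sorted(key=count, reverse=True)
theorem pvSort_eq (items : List (Char × Int)) :
    (PySem.List.pyRange 0 (items.length : Int)).foldl
      (fun acc i => pvBubblePass (((items.length : Int)) - i - 1).toNat acc) items
    = PySem.List.sorted items (fun kv => kv.2) true := by
  rw [PySem.List.pyRange_zero_natCast, List.foldl_map]
  have hbody : ∀ (acc : List (Char × Int)), ∀ k ∈ List.range items.length,
      pvBubblePass (((items.length : Int)) - (k : Int) - 1).toNat acc
        = pvBubblePass (items.length - k - 1) acc := by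
    intro acc k hk
    congr 1
    simp at hk
    omega
  rw [PySem.List.foldl_congr_mem _ _ _ _ hbody]
  obtain ⟨hpair, hfil⟩ := pvBubble_sorts items
  apply pvStableUnique _ _ hpair (PySem.List.sorted_pairwise_rev items (fun kv => kv.2))
  intro c
  rw [hfil c, pvSorted_filter]

-- ===== VERDICT (by name: the statement is the Claim_ definition above) =====
theorem counterSymbols_spec : Claim_equal_counterSymbols := by
  intro text registr _
  unfold Spec_counterSymbols counterSymbols counterSymbols_alt
  simp only []
  rw [pvFreq_eq, pvSort_eq]
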